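-- pv_equiv track=rewrite | github.com/bharathadolf/studioTerminal | Terminal/commands/assign.py | _get_commands_from_args
-- ===== SOURCE A (Python) =====
-- from typing import List
--
-- def _get_commands_from_args(args: List[str], flag: str) -> List[str]:
--     """Extracts a list of commands following a specific flag."""
--     commands = []
--     if flag in args:
--         try:
--             start_index = args.index(flag) + 1
--             for arg in args[start_index:]:
--                 if arg.startswith('--'):
--                     break
--                 commands.append(arg)
--         except IndexError:
--             pass
--     return commands
-- ===== SOURCE B (Python) =====
-- from typing import List
--
-- def _get_commands_from_args(args: List[str], flag: str) -> List[str]: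
--     """Single fused scan: a boolean state machine replaces membership test,
--     index lookup and slicing."""
--     commands = []
--     collecting = False
--     for arg in args:
--         if collecting:
--             if arg.startswith('--'):
--                 break
--             commands.append(arg)
--         elif arg == flag:
--             collecting = True
--     return commands
-- ===== Notes on version B (the rewrite author's own statement) =====
-- stated objective: simpler
-- what changed: Replaces the membership test + .index + slice + collect loop with one linear state-machine pass driven by a boolean 'collecting' flag.
import Mathlib
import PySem

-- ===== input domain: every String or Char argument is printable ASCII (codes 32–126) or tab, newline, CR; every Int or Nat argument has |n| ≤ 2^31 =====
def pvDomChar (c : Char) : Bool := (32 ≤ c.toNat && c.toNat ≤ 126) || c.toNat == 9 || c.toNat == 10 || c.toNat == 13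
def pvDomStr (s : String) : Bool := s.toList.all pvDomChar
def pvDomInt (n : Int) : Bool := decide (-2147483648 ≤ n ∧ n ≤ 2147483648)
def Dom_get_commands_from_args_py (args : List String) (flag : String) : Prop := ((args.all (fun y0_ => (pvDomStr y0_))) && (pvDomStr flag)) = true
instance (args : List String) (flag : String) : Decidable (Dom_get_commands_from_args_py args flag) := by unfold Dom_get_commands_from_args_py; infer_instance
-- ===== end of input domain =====

-- B replaces A's membership test + .index + slice + collect loop with one linear
-- boolean-state-machine pass; equal return value on all inputs (simpler, same cost).

-- ===== PORT A =====
-- the 'for arg in args[start_index:]' loop with its break, accumulating into commands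
def pvA_collect (xs : List String) (acc : List String) : List String :=
  match xs with
  | [] => acc
  | a :: rest => if PySem.Str.startswith a "--" then acc else pvA_collect rest (acc ++ [a])

def get_commands_from_args_py (args : List String) (flag : String) : List String :=
  if flag ∈ args then
    match PySem.List.index? args flag with
    | some i => pvA_collect (PySem.List.slice args (some ((i : Int) + 1)) none) []
    | none => []   -- unreachable: flag ∈ args
  else []

-- ===== PORT B =====
-- single pass with boolean state 'collecting'
def pvB_go (flag : String) (collecting : Bool) (acc : List String) : List String → List String
  | [] => acc
  | a :: rest =>
    if collecting then
      if PySem.Str.startswith a "--" then acc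
      else pvB_go flag collecting (acc ++ [a]) rest
    else if a == flag then pvB_go flag true acc rest
    else pvB_go flag collecting acc rest

def get_commands_from_args_py_alt (args : List String) (flag : String) : List String :=
  pvB_go flag false [] args

-- ===== PRECONDITION & SPEC =====
def Spec_get_commands_from_args_py (args : List String) (flag : String) (out : List String) : Prop := out = get_commands_from_args_py_alt args flag
instance (args : List String) (flag : String) (out : List String) : Decidable (Spec_get_commands_from_args_py args flag out) := by unfold Spec_get_commands_from_args_py; infer_instance

-- ===== CLAIM (what is proved, stated in full; the proofs are below) =====
def Claim_equal_get_commands_from_args_py : Prop := ∀ (args : List String) (flag : String), Dom_get_commands_from_args_py args flag → Spec_get_commands_from_args_py args flag (get_commands_from_args_py args flag)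

-- ===== LEMMAS AND PROOFS =====

-- B in the collecting state is exactly A's collect loop
theorem pvB_go_collecting (flag : String) (xs acc : List String) :
    pvB_go flag true acc xs = pvA_collect xs acc := by
  induction xs generalizing acc with
  | nil => rfl
  | cons a rest ih =>
    simp only [pvB_go, pvA_collect, if_true]
    split
    · rfl
    · exact ih _

-- B before seeing the flag returns its accumulator when the flag is absent
theorem pvB_go_not_mem (flag : String) (xs acc : List String) (h : flag ∉ xs) :
    pvB_go flag false acc xs = acc := by
  induction xs with
  | nil => rfl
  | cons a rest ih =>
    have hne : a ≠ flag := fun e => h (e ▸ List.mem_cons_self)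
    simp only [pvB_go, Bool.false_eq_true, if_false, beq_iff_eq, hne]
    exact ih (fun hm => h (List.mem_cons_of_mem _ hm))

theorem ports_agree (args : List String) (flag : String) :
    get_commands_from_args_py args flag = get_commands_from_args_py_alt args flag := by
  induction args with
  | nil => rfl
  | cons a rest ih =>
    by_cases hf : a = flag
    · subst hf
      simp only [get_commands_from_args_py, get_commands_from_args_py_alt,
        List.mem_cons, true_or, if_true, PySem.List.index?_cons_self]
      have h1 : PySem.List.slice (a :: rest) (some ((0 : Nat) + 1 : Int)) none = rest := by
        have := PySem.List.slice_from_natCast (a :: rest) 1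
        simpa using this
      rw [show ((0:Nat):Int)+1 = (((1:Nat)):Int) by norm_num, PySem.List.slice_from_natCast]
      simp only [List.drop_one, List.tail_cons]
      simp only [pvB_go, if_true, beq_self_eq_true]
      exact (pvB_go_collecting a rest []).symm
    · by_cases hm : flag ∈ rest
      · -- flag occurs later: both sides reduce to the tail
        obtain ⟨j, hj⟩ := Option.isSome_iff_exists.mp
          ((PySem.List.index?_isSome_iff rest flag).mpr hm)
        have hA : get_commands_from_args_py (a :: rest) flag
            = get_commands_from_args_py rest flag := by
          simp only [get_commands_from_args_py, List.mem_cons, hm, or_true, if_true, hj]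
          rw [PySem.List.index?_cons_of_ne rest hf, hj]
          simp only [Option.map_some]
          rw [show (((j + 1 : Nat)) : Int) + 1 = (((j + 2 : Nat)) : Int) by push_cast; ring,
            PySem.List.slice_from_natCast,
            show ((j : Nat) : Int) + 1 = (((j + 1 : Nat)) : Int) by push_cast; ring,
            PySem.List.slice_from_natCast]
          rfl
        have hB : get_commands_from_args_py_alt (a :: rest) flag
            = get_commands_from_args_py_alt rest flag := by
          simp only [get_commands_from_args_py_alt, pvB_go, Bool.false_eq_true, if_false,
            beq_iff_eq, hf]
        rw [hA, hB, ih]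
      · -- flag absent everywhere: both empty
        have hnm : flag ∉ a :: rest := by
          intro h
          rcases List.mem_cons.mp h with h | h
          · exact hf h.symm
          · exact hm h
        simp only [get_commands_from_args_py, hnm, if_false,
          get_commands_from_args_py_alt]
        exact (pvB_go_not_mem flag (a :: rest) [] hnm).symm

-- ===== VERDICT (by name: the statement is the Claim_ definition above) =====
theorem get_commands_from_args_py_spec : Claim_equal_get_commands_from_args_py := by
  intro args flag _
  exact ports_agree args flag
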